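-- pv_equiv track=rewrite | github.com/arnebackstein/iflow | data/human_robot_interaction_data/read_hh_hr_data.py | extract_robot_indices
-- ===== SOURCE A (Python) =====
-- def extract_robot_indices(names):
--
-- 	L_joints_p = []
-- 	L_joints_v = []
-- 	L_cart     = []
-- 	R_joints_p = []
-- 	R_joints_v = []
-- 	R_cart     = []
-- 	c = 0
-- 	for i in names:
-- 		if len(i)>0:
-- 			if i[0]  == 'L':
-- 				if i[-2]  == 'V':
-- 					L_joints_v.append(c)
-- 				if i[-2]  == 'P':
-- 					L_joints_p.append(c)
-- 				if i[-2]  == 'T':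
-- 					L_cart.append(c)
-- 			if i[0]  == 'R':
-- 				if i[-2]  == 'V':
-- 					R_joints_v.append(c)
-- 				if i[-2]  == 'P':
-- 					R_joints_p.append(c)
-- 				if i[-2]  == 'T':
-- 					R_cart.append(c)
-- 		c = c + 1
-- 	return L_joints_p, L_joints_v, L_cart, R_joints_p, R_joints_v, R_cart
-- ===== SOURCE B (Python) =====
-- def extract_robot_indices(names):
--     def pick(prefix, suffix):
--         return [i for i, n in enumerate(names) if n[:1] == prefix and n[-2:-1] == suffix]
--     return (pick('L', 'P'), pick('L', 'V'), pick('L', 'T'),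
--             pick('R', 'P'), pick('R', 'V'), pick('R', 'T'))
-- ===== Notes on version B (the rewrite author's own statement) =====
-- stated objective: idiomatic
-- what changed: A's single accumulating pass with a manual counter and six nested if-chains on i[0]/i[-2] is replaced by six declarative filtered comprehensions over enumerate(names) using raise-free slice comparisons n[:1]/n[-2:-1].
import Mathlib
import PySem

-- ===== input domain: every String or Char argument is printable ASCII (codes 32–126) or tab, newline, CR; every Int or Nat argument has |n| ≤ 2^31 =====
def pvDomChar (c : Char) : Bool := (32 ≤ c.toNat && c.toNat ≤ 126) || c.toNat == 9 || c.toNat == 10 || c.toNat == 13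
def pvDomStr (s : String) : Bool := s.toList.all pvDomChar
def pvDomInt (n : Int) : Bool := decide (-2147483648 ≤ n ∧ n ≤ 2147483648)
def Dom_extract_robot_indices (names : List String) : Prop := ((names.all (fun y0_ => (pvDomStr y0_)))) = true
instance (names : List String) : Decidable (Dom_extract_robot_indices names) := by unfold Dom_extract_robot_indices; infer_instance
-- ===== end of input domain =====

-- B replaces A's single accumulating pass (manual counter, six nested if-chains) by six
-- declarative filtered passes over enumerate(names) with raise-free slice comparisons (idiomatic).

-- ===== PORT A =====
-- A's for-loop as structural recursion over the same state (six lists and the counter c).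
-- Python's i[-2] raises IndexError where pyGetD returns the default ' '; Pre_ excludes
-- exactly the inputs where that read is reached on a too-short string.
def eriLoopA : List String → List Int → List Int → List Int → List Int → List Int → List Int → Int →
    List Int × List Int × List Int × List Int × List Int × List Int
  | [], lp, lv, lc, rp, rv, rc, _ => (lp, lv, lc, rp, rv, rc)
  | i :: rest, lp, lv, lc, rp, rv, rc, c =>
    if 0 < i.toList.length then
      eriLoopA rest
        (if PySem.List.pyGetD i.toList 0 ' ' = 'L' then
          (if PySem.List.pyGetD i.toList (-2) ' ' = 'P' then lp ++ [c] else lp) else lp)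
        (if PySem.List.pyGetD i.toList 0 ' ' = 'L' then
          (if PySem.List.pyGetD i.toList (-2) ' ' = 'V' then lv ++ [c] else lv) else lv)
        (if PySem.List.pyGetD i.toList 0 ' ' = 'L' then
          (if PySem.List.pyGetD i.toList (-2) ' ' = 'T' then lc ++ [c] else lc) else lc)
        (if PySem.List.pyGetD i.toList 0 ' ' = 'R' then
          (if PySem.List.pyGetD i.toList (-2) ' ' = 'P' then rp ++ [c] else rp) else rp)
        (if PySem.List.pyGetD i.toList 0 ' ' = 'R' then
          (if PySem.List.pyGetD i.toList (-2) ' ' = 'V' then rv ++ [c] else rv) else rv)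
        (if PySem.List.pyGetD i.toList 0 ' ' = 'R' then
          (if PySem.List.pyGetD i.toList (-2) ' ' = 'T' then rc ++ [c] else rc) else rc)
        (c + 1)
    else
      eriLoopA rest lp lv lc rp rv rc (c + 1)

def extract_robot_indices (names : List String) : List Int × List Int × List Int × List Int × List Int × List Int :=
  eriLoopA names [] [] [] [] [] [] 0

-- ===== PORT B =====
-- enumerate(names) starting at a given counter
def eriEnum : Int → List String → List (Int × String)
  | _, [] => []
  | c, n :: rest => (c, n) :: eriEnum (c + 1) rest

-- n[:1] == prefix and n[-2:-1] == suffix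
def eriCond (n : String) (pre suf : Char) : Bool :=
  PySem.List.slice n.toList none (some 1) == [pre] &&
  PySem.List.slice n.toList (some (-2)) (some (-1)) == [suf]

-- [i for i, n in enumerate(names) if n[:1] == prefix and n[-2:-1] == suffix]
def eriPick (names : List String) (pre suf : Char) : List Int :=
  ((eriEnum 0 names).filter (fun p => eriCond p.2 pre suf)).map (·.1)

def extract_robot_indices_alt (names : List String) : List Int × List Int × List Int × List Int × List Int × List Int :=
  (eriPick names 'L' 'P', eriPick names 'L' 'V', eriPick names 'L' 'T',
   eriPick names 'R' 'P', eriPick names 'R' 'V', eriPick names 'R' 'T')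

-- ===== PRECONDITION & SPEC =====
-- Pre_ excludes exactly the inputs on which Python A raises IndexError: a name that is the
-- single character 'L' or 'R' reaches i[-2] on a length-1 string.
def Pre_extract_robot_indices (names : List String) : Prop :=
  ¬ ("L" ∈ names) ∧ ¬ ("R" ∈ names)
instance (names : List String) : Decidable (Pre_extract_robot_indices names) := by
  unfold Pre_extract_robot_indices; infer_instance

def pvWitness_extract_robot_indices : List String := ["LSP x", "RSV y", "", "Lt"]

def Spec_extract_robot_indices (names : List String) (out : List Int × List Int × List Int × List Int × List Int × List Int) : Prop := out = extract_robot_indices_alt names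
instance (names : List String) (out : List Int × List Int × List Int × List Int × List Int × List Int) : Decidable (Spec_extract_robot_indices names out) := by unfold Spec_extract_robot_indices; infer_instance

-- ===== CLAIM (what is proved, stated in full; the proofs are below) =====
def Claim_equal_extract_robot_indices : Prop := ∀ (names : List String), Dom_extract_robot_indices names → Pre_extract_robot_indices names → Spec_extract_robot_indices names (extract_robot_indices names)
-- ===== LEMMAS AND PROOFS =====

lemma eriTakeOneDrop (l : List Char) (k : Nat) (h : k < l.length) :
    (l.drop k).take 1 = [l[k]] := by
  rw [List.drop_eq_getElem_cons h, List.take_succ_cons, List.take_zero]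

-- B's slice condition (over the char list) equals A's guard chain, provided the suffix
-- letter is not the ' ' default.
lemma eriCondL_iff (cs : List Char) (pre suf : Char) (hs : suf ≠ ' ') :
    ((PySem.List.slice cs none (some 1) == [pre]) &&
      (PySem.List.slice cs (some (-2)) (some (-1)) == [suf])) = true ↔
      (0 < cs.length ∧ PySem.List.pyGetD cs 0 ' ' = pre ∧
       PySem.List.pyGetD cs (-2) ' ' = suf) := by
  by_cases h2 : 2 ≤ cs.length
  · have h1 : 0 < cs.length := by omega
    have hsl1 : PySem.List.slice cs none (some 1) = [cs[0]] := by
      simp only [PySem.List.slice]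
      have : min 1 cs.length = 1 := by omega
      simpa [this] using eriTakeOneDrop cs 0 h1
    have hsl2 : PySem.List.slice cs (some (-2)) (some (-1)) = [cs[cs.length - 2]] := by
      simp only [PySem.List.slice, PySem.List.clampIdx]
      have e1 : ((cs.length : Int) + -1) = ((cs.length - 1 : Nat) : Int) := by omega
      have e2 : ((cs.length : Int) + -2) = ((cs.length - 2 : Nat) : Int) := by omega
      rw [if_pos (by norm_num : (-1 : Int) < 0), if_pos (by norm_num : (-2 : Int) < 0),
          if_neg (by omega), if_neg (by omega), e1, e2, Int.toNat_natCast, Int.toNat_natCast]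
      have hk : cs.length - 1 - (cs.length - 2) = 1 := by omega
      rw [hk, List.drop_eq_getElem_cons (by omega : cs.length - 2 < cs.length),
          List.take_succ_cons, List.take_zero]
    have hg0 : PySem.List.pyGetD cs 0 ' ' = cs[0] := by
      simp [PySem.List.pyGetD, PySem.List.pyGet?, PySem.List.pyIdx?, h1]
    have hg2 : PySem.List.pyGetD cs (-2) ' ' = cs[cs.length - 2] := by
      simp only [PySem.List.pyGetD, PySem.List.pyGet?, PySem.List.pyIdx?]
      simp [h2, List.getElem?_eq_getElem (by omega : cs.length - 2 < cs.length)]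
    simp [hsl1, hsl2, hg0, hg2, h1]
  · -- length 0 or 1: the suffix slice is empty and pyGetD (-2) is the default ' '
    rcases cs with _ | ⟨a, _ | ⟨b, t⟩⟩
    · simp [PySem.List.slice, PySem.List.clampIdx, PySem.List.pyGetD, PySem.List.pyGet?,
            PySem.List.pyIdx?]
    · simp only [PySem.List.slice, PySem.List.clampIdx, PySem.List.pyGetD, PySem.List.pyGet?,
                 PySem.List.pyIdx?]
      norm_num
      intro _ h; exact hs h.symm
    · exfalso; apply h2; simp

lemma eriCond_iff (n : String) (pre suf : Char) (hs : suf ≠ ' ') :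
    eriCond n pre suf = true ↔
      (0 < n.toList.length ∧ PySem.List.pyGetD n.toList 0 ' ' = pre ∧
       PySem.List.pyGetD n.toList (-2) ' ' = suf) :=
  eriCondL_iff n.toList pre suf hs

-- B's comprehension started at counter c, unfolded one step
lemma eriPick_cons (c : Int) (n : String) (rest : List String) (pre suf : Char) :
    ((eriEnum c (n :: rest)).filter (fun p => eriCond p.2 pre suf)).map (·.1) =
      (if eriCond n pre suf then [c] else []) ++
        ((eriEnum (c + 1) rest).filter (fun p => eriCond p.2 pre suf)).map (·.1) := by
  by_cases h : eriCond n pre suf <;> simp [eriEnum, h]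

-- one accumulator update of A equals appending B's one-step contribution
lemma eriKey (n : String) (c : Int) (pre suf : Char) (acc : List Int)
    (hs : suf ≠ ' ') (hlen : 0 < n.toList.length) :
    (if PySem.List.pyGetD n.toList 0 ' ' = pre then
       (if PySem.List.pyGetD n.toList (-2) ' ' = suf then acc ++ [c] else acc) else acc) =
      acc ++ (if eriCond n pre suf then [c] else []) := by
  by_cases hb : eriCond n pre suf = true
  · obtain ⟨-, h1, h2⟩ := (eriCond_iff n pre suf hs).mp hb
    rw [if_pos h1, if_pos h2, hb, if_pos rfl]
  · have hnot := (eriCond_iff n pre suf hs).not.mp (by simpa using hb)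
    rw [Bool.not_eq_true] at hb
    rw [hb]
    split_ifs with g1 g2 <;> simp_all

-- main invariant: A's loop appends exactly B's picks (from counter c) to the accumulators
lemma eriLoopA_eq (names : List String) : ∀ (c : Int) (lp lv lc rp rv rc : List Int),
    eriLoopA names lp lv lc rp rv rc c =
      (lp ++ ((eriEnum c names).filter (fun p => eriCond p.2 'L' 'P')).map (·.1),
       lv ++ ((eriEnum c names).filter (fun p => eriCond p.2 'L' 'V')).map (·.1),
       lc ++ ((eriEnum c names).filter (fun p => eriCond p.2 'L' 'T')).map (·.1),
       rp ++ ((eriEnum c names).filter (fun p => eriCond p.2 'R' 'P')).map (·.1),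
       rv ++ ((eriEnum c names).filter (fun p => eriCond p.2 'R' 'V')).map (·.1),
       rc ++ ((eriEnum c names).filter (fun p => eriCond p.2 'R' 'T')).map (·.1)) := by
  induction names with
  | nil => intro c lp lv lc rp rv rc; simp [eriLoopA, eriEnum]
  | cons n rest ih =>
    intro c lp lv lc rp rv rc
    rw [eriLoopA]
    by_cases hlen : 0 < n.toList.length
    · rw [if_pos hlen, ih]
      rw [eriKey n c 'L' 'P' lp (by decide) hlen, eriKey n c 'L' 'V' lv (by decide) hlen,
          eriKey n c 'L' 'T' lc (by decide) hlen, eriKey n c 'R' 'P' rp (by decide) hlen,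
          eriKey n c 'R' 'V' rv (by decide) hlen, eriKey n c 'R' 'T' rc (by decide) hlen]
      simp [eriPick_cons, List.append_assoc]
    · rw [if_neg hlen, ih]
      have hfalse : ∀ pre suf : Char, suf ≠ ' ' → eriCond n pre suf = false := by
        intro pre suf hs
        rw [Bool.eq_false_iff]
        intro h
        exact hlen ((eriCond_iff n pre suf hs).mp h).1
      simp [eriPick_cons, hfalse 'L' 'P' (by decide), hfalse 'L' 'V' (by decide),
            hfalse 'L' 'T' (by decide), hfalse 'R' 'P' (by decide),
            hfalse 'R' 'V' (by decide), hfalse 'R' 'T' (by decide)]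

-- ===== VERDICT =====
theorem extract_robot_indices_spec : Claim_equal_extract_robot_indices := by
  intro names _ _
  unfold Spec_extract_robot_indices extract_robot_indices extract_robot_indices_alt eriPick
  rw [eriLoopA_eq]
  simp
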